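-- pv_equiv track=rewrite | github.com/DeraUchenwoke/advent-of-code | 2025/day_3_2.py | max_found
-- ===== SOURCE A (Python) =====
-- from typing import List
--
-- def max_found(subset: List[str], start: int, end: int) -> tuple[str, int]:
--     max_val = "0"  # Initialise with least possible value
--     updated_start = start
--     for i in range(start, end + 1):
--         if subset[i] > max_val:
--             max_val = subset[i]
--             updated_start = i + 1
--     return max_val, updated_start
-- ===== SOURCE B (Python) =====
-- from typing import List
--
-- def max_found(subset: List[str], start: int, end: int) -> tuple[str, int]:
--     # Pass 1: maximum over the range, floored at the "0" sentinel.
--     max_val = max((subset[i] for i in range(start, end + 1)), default="0")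
--     if max_val < "0":
--         max_val = "0"
--     # Pass 2: first index holding the maximum (only if something beat the sentinel).
--     updated_start = start
--     if max_val > "0":
--         for i in range(start, end + 1):
--             if subset[i] == max_val:
--                 updated_start = i + 1
--                 break
--     return max_val, updated_start
-- ===== Notes on version B (the rewrite author's own statement) =====
-- stated objective: alternative
-- what changed: Replaces A's single fused scan that tracks (running max, last-update index) with two independent passes: a builtin max() over the range (floored at the '0' sentinel) followed by a find-first-occurrence scan with early break.
import Mathlib
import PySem

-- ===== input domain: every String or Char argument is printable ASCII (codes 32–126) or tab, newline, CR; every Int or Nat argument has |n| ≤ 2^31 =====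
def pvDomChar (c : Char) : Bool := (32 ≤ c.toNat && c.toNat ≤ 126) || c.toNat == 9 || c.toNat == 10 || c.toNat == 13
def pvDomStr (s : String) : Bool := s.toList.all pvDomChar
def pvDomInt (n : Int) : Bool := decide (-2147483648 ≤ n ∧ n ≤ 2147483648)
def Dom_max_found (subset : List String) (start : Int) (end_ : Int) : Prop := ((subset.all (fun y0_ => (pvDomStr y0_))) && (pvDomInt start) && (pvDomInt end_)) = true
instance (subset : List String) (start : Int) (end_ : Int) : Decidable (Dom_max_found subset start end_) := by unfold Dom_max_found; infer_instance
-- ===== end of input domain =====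

-- B replaces A's fused max+index scan by two passes (builtin max, then find first occurrence);
-- equal return value on all inputs where the Python A returns (Pre_ excludes only IndexError).

-- ===== PORT A =====
-- fused loop: running max (sentinel "0") and index-after-last-update
def max_found (subset : List String) (start : Int) (end_ : Int) : String × Int :=
  (PySem.List.pyRange start (end_ + 1) 1).foldl
    (fun st i =>
      if st.1 < (PySem.List.pyGet? subset i).getD "" then ((PySem.List.pyGet? subset i).getD "", i + 1) else st)
    ("0", start)

-- ===== PORT B =====
-- pass 1: max over the range with default "0", floored at "0"; pass 2: first index equal to the max
def max_found_alt (subset : List String) (start : Int) (end_ : Int) : String × Int :=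
  let idxs := PySem.List.pyRange start (end_ + 1) 1
  let m0 := (PySem.List.max? (idxs.map (fun i => (PySem.List.pyGet? subset i).getD "")) (fun v => v)).getD "0"
  let m := if m0 < "0" then "0" else m0
  let u := if ("0" : String) < m then
      match idxs.find? (fun i => (PySem.List.pyGet? subset i).getD "" == m) with
      | some j => j + 1
      | none => start
    else start
  (m, u)

-- ===== PRECONDITION & SPEC =====
-- Pre_ excludes exactly the inputs on which Python A raises IndexError (some index of the
-- nonempty range start..end_ outside [-len, len)); A returns on every other input.
def Pre_max_found (subset : List String) (start : Int) (end_ : Int) : Prop :=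
  start ≤ end_ → (-(subset.length : Int) ≤ start ∧ end_ < (subset.length : Int))
instance (subset : List String) (start : Int) (end_ : Int) : Decidable (Pre_max_found subset start end_) := by unfold Pre_max_found; infer_instance

def pvWitness_max_found : List String × Int × Int := (["5", "3", "7", "7"], 0, 3)

def Spec_max_found (subset : List String) (start : Int) (end_ : Int) (out : String × Int) : Prop := out = max_found_alt subset start end_
instance (subset : List String) (start : Int) (end_ : Int) (out : String × Int) : Decidable (Spec_max_found subset start end_ out) := by unfold Spec_max_found; infer_instance

-- ===== CLAIM (what is proved, stated in full; the proofs are below) =====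
def Claim_equal_max_found : Prop := ∀ (subset : List String) (start : Int) (end_ : Int), Dom_max_found subset start end_ → Pre_max_found subset start end_ → Spec_max_found subset start end_ (max_found subset start end_)

-- ===== LEMMAS AND PROOFS =====

-- running maximum of f over a list of indices, starting at a
def runMax (f : Int → String) (l : List Int) (a : String) : String :=
  l.foldl (fun b i => if b < f i then f i else b) a

lemma runMax_nil (f : Int → String) (a : String) : runMax f [] a = a := rfl

lemma runMax_cons (f : Int → String) (i : Int) (l : List Int) (a : String) :
    runMax f (i :: l) a = runMax f l (if a < f i then f i else a) := rfl

lemma if_lt_eq_max (x y : String) : (if x < y then y else x) = max x y := by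
  rcases lt_or_ge x y with h | h
  · rw [if_pos h, max_eq_right (le_of_lt h)]
  · rw [if_neg (not_lt.mpr h), max_eq_left h]

lemma le_runMax (f : Int → String) : ∀ (l : List Int) (a : String), a ≤ runMax f l a := by
  intro l
  induction l with
  | nil => intro a; exact le_rfl
  | cons i l ih =>
      intro a
      rw [runMax_cons]
      refine le_trans ?_ (ih _)
      split
      · exact le_of_lt (by assumption)
      · exact le_rfl

lemma runMax_exists (f : Int → String) : ∀ (l : List Int) (a : String),
    a < runMax f l a → ∃ j ∈ l, f j = runMax f l a := by
  intro l
  induction l with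
  | nil => intro a h; simp [runMax_nil] at h
  | cons i l ih =>
      intro a h
      rw [runMax_cons] at h ⊢
      by_cases hs : (if a < f i then f i else a) < runMax f l (if a < f i then f i else a)
      · obtain ⟨j, hj, hfj⟩ := ih _ hs
        exact ⟨j, List.mem_cons_of_mem _ hj, hfj⟩
      · have heq : runMax f l (if a < f i then f i else a) = (if a < f i then f i else a) :=
          le_antisymm (not_lt.mp hs) (le_runMax f l _)
        rw [heq] at h ⊢
        split at h
        · exact ⟨i, List.mem_cons_self, by simp_all⟩
        · exact absurd h (lt_irrefl a)

lemma max_runMax (f : Int → String) : ∀ (l : List Int) (c a : String),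
    max c (runMax f l a) = runMax f l (max c a) := by
  intro l
  induction l with
  | nil => intro c a; simp [runMax_nil]
  | cons i l ih =>
      intro c a
      rw [runMax_cons, runMax_cons, if_lt_eq_max, if_lt_eq_max, ih, ← max_assoc]

lemma foldl_max_eq_runMax (f : Int → String) : ∀ (l : List Int) (a : String),
    l.foldl (fun x i => max x (f i)) a = runMax f l a := by
  intro l
  induction l with
  | nil => intro a; rfl
  | cons i l ih =>
      intro a
      rw [List.foldl_cons, ih, runMax_cons, if_lt_eq_max]

-- characterization of A's fused loop
lemma fused_char (f : Int → String) : ∀ (l : List Int) (m : String) (u : Int),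
    l.foldl (fun st i => if st.1 < f i then (f i, i + 1) else st) (m, u)
      = (runMax f l m,
         if m < runMax f l m then
           (match l.find? (fun i => f i == runMax f l m) with
            | some j => j + 1
            | none => u)
         else u) := by
  intro l
  induction l with
  | nil => intro m u; simp [runMax_nil]
  | cons i l ih =>
      intro m u
      rw [List.foldl_cons]
      by_cases h : m < f i
      · have h1 : (if (m, u).1 < f i then (f i, i + 1) else (m, u)) = (f i, i + 1) := if_pos h
        rw [h1, ih (f i) (i + 1), runMax_cons, if_pos h]
        have hfile : f i ≤ runMax f l (f i) := le_runMax f l (f i)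
        have hm : m < runMax f l (f i) := lt_of_lt_of_le h hfile
        rw [if_pos hm]
        by_cases htop : f i = runMax f l (f i)
        · have hnlt : ¬ f i < runMax f l (f i) := by rw [← htop]; exact lt_irrefl _
          have hpos : (fun k => f k == runMax f l (f i)) i = true := by
            simp only [beq_iff_eq]; exact htop
          rw [if_neg hnlt, List.find?_cons_of_pos (p := fun k => f k == runMax f l (f i)) hpos]
        · have hlt : f i < runMax f l (f i) := lt_of_le_of_ne hfile htop
          rw [if_pos hlt]
          obtain ⟨j, hj, hfj⟩ := runMax_exists f l (f i) hlt
          have hsome : (List.find? (fun k => f k == runMax f l (f i)) l).isSome := by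
            rw [List.find?_isSome]
            exact ⟨j, hj, by simp only [beq_iff_eq]; exact hfj⟩
          obtain ⟨j0, hj0⟩ := Option.isSome_iff_exists.mp hsome
          have hneg : ¬ (fun k => f k == runMax f l (f i)) i = true := by
            simp only [beq_iff_eq]; exact htop
          rw [List.find?_cons_of_neg (p := fun k => f k == runMax f l (f i)) hneg, hj0]
      · have h1 : (if (m, u).1 < f i then (f i, i + 1) else (m, u)) = (m, u) := if_neg h
        rw [h1, ih m u, runMax_cons, if_neg h]
        by_cases hm : m < runMax f l m
        · have hne : ¬ (fun k => f k == runMax f l m) i = true := by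
            simp only [beq_iff_eq]
            intro hc
            exact absurd hm (not_lt.mpr (hc ▸ (not_lt.mp h)))
          rw [if_pos hm, if_pos hm, List.find?_cons_of_neg (p := fun k => f k == runMax f l m) hne]
        · rw [if_neg hm, if_neg hm]

-- characterization of B's first pass
lemma bmax_char (subset : List String) : ∀ (l : List Int),
    (if ((PySem.List.max? (l.map (fun i => (PySem.List.pyGet? subset i).getD "")) (fun v => v)).getD "0") < "0"
       then "0"
       else ((PySem.List.max? (l.map (fun i => (PySem.List.pyGet? subset i).getD "")) (fun v => v)).getD "0"))
      = runMax (fun i => (PySem.List.pyGet? subset i).getD "") l "0" := by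
  intro l
  set f : Int → String := fun i => (PySem.List.pyGet? subset i).getD "" with hf
  cases l with
  | nil =>
      have hnone : PySem.List.max? (([] : List Int).map f) (fun v => v) = none :=
        (PySem.List.max?_eq_none_iff _ _).mpr (by simp)
      rw [hnone]
      simp [runMax_nil]
  | cons i l =>
      rw [List.map_cons, PySem.List.max?_id_cons, Option.getD_some, List.foldl_map,
        foldl_max_eq_runMax f l (f i), if_lt_eq_max, max_comm, max_runMax, runMax_cons,
        if_lt_eq_max]

-- ===== VERDICT (by name: the statement is the Claim_ definition above) =====
theorem max_found_spec : Claim_equal_max_found := by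
  intro subset start end_ _ _
  unfold Spec_max_found max_found max_found_alt
  simp only []
  rw [fused_char, bmax_char subset (PySem.List.pyRange start (end_ + 1) 1)]
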